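-- pv_equiv track=rewrite | github.com/TyKo0707/internship_application | generate_tests.py | generate_edge_and_special_cases
-- ===== SOURCE A (Python) =====
-- import math
--
-- def generate_edge_and_special_cases(interval_end, curr_special_case_n, special_case_n, interval_sign):
--     """ Generate edge cases and special cases for the interval """
--     square_root = int(math.sqrt(interval_end))
--     examples_in_interval = set()
--     examples_in_interval.add((1, interval_end, interval_sign))
--     examples_in_interval.add((square_root, square_root, interval_sign))
--
--     # Generate special case pairs where n * n^2 is within the interval
--     while curr_special_case_n * (curr_special_case_n ** 2) <= interval_end:
--         A = curr_special_case_n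
--         B = curr_special_case_n ** 2
--         examples_in_interval.add((A, B, interval_sign))
--         curr_special_case_n += special_case_n
--
--     return curr_special_case_n, examples_in_interval
-- ===== SOURCE B (Python) =====
-- import math
--
--
-- def _icbrt(n):
--     """Largest integer r >= 0 with r**3 <= n (n >= 0), by doubling + bisection."""
--     hi = 1
--     while hi * hi * hi <= n:
--         hi *= 2
--     lo = 0
--     while hi - lo > 1:
--         mid = (lo + hi) // 2
--         if mid * mid * mid <= n:
--             lo = mid
--         else:
--             hi = mid
--     return lo
--
--
-- def generate_edge_and_special_cases(interval_end, curr_special_case_n, special_case_n, interval_sign):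
--     square_root = math.isqrt(interval_end)
--     r = _icbrt(interval_end)
--     # number of loop steps of the original iteration, in closed form
--     k = (r - curr_special_case_n) // special_case_n + 1 if curr_special_case_n <= r else 0
--     counter = curr_special_case_n + k * special_case_n
--     items = [(1, interval_end, interval_sign), (square_root, square_root, interval_sign)]
--     items += [(curr_special_case_n + i * special_case_n,
--                (curr_special_case_n + i * special_case_n) ** 2,
--                interval_sign) for i in range(k)]
--     return counter, set(items)
-- ===== Notes on version B (the rewrite author's own statement) =====
-- stated objective: faster
-- what changed: Replaces A's one-term-at-a-time while loop by a closed-form iteration count derived from an exact integer cube root (doubling + bisection), then emits the counter and the whole set in one shot.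
import Mathlib
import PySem

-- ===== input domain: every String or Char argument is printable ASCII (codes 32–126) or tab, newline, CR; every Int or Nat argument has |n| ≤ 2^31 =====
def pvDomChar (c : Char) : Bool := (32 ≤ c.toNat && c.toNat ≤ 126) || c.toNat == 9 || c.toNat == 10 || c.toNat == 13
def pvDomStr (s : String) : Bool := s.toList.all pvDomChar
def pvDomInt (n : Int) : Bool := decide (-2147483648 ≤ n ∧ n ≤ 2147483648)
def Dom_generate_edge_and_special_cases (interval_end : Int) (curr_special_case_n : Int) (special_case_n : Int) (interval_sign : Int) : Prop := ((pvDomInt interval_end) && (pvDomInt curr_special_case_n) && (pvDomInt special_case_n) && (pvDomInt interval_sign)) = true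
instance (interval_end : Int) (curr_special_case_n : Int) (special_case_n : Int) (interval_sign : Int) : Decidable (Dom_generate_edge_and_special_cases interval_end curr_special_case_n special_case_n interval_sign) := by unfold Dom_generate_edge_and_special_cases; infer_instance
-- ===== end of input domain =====

-- B replaces A's one-term-at-a-time while loop by a closed-form step count obtained from an
-- exact integer cube root (doubling + bisection), then builds the same set in one shot.

-- ===== PORT A =====
-- A's while loop: state (curr, set); stops when curr^3 > interval_end. The fuel argument is
-- a totality guard only: on every input admitted by Pre_ the fuel passed below exceeds the
-- number of iterations (proved in loopA_closed/the verdict), so it never cuts the loop short.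
def pvLoopA (E s sign : Int) : Nat → Int → PySem.Set (Int × Int × Int) →
    Int × PySem.Set (Int × Int × Int)
  | 0, curr, st => (curr, st)
  | fuel + 1, curr, st =>
    if curr * curr ^ 2 ≤ E then
      pvLoopA E s sign fuel (curr + s) (PySem.Set.add st (curr, curr ^ 2, sign))
    else (curr, st)

-- int(math.sqrt(E)) = Int.sqrt E: exact for 0 ≤ E ≤ 2^31 (Dom), since double sqrt is
-- correctly rounded and the gap to the next square exceeds one ulp in this range.
def generate_edge_and_special_cases (interval_end : Int) (curr_special_case_n : Int) (special_case_n : Int) (interval_sign : Int) : Int × (List (Int × Int × Int)) :=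
  let square_root := Int.sqrt interval_end
  let examples := PySem.Set.add (PySem.Set.add PySem.Set.empty (1, interval_end, interval_sign))
      (square_root, square_root, interval_sign)
  pvLoopA interval_end special_case_n interval_sign
    (interval_end.natAbs + 1 + curr_special_case_n.natAbs) curr_special_case_n examples

-- ===== PORT B =====
-- Source B's _icbrt: doubling loop ('while hi*hi*hi <= n: hi *= 2'); fuel is a totality guard
-- only (n.natAbs + 2 always exceeds the number of doublings needed from hi = 1).
def pvCbrtHi (n : Int) : Nat → Int → Int
  | 0, hi => hi
  | fuel + 1, hi => if hi * hi * hi ≤ n then pvCbrtHi n fuel (hi * 2) else hi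

-- Source B's bisection loop: invariant lo^3 ≤ n < hi^3.
def pvCbrtBis (n : Int) : Nat → Int → Int → Int
  | 0, lo, _ => lo
  | fuel + 1, lo, hi =>
    if 1 < hi - lo then
      let mid := PySem.Int.floordiv (lo + hi) 2
      if mid * mid * mid ≤ n then pvCbrtBis n fuel mid hi else pvCbrtBis n fuel lo mid
    else lo

def pvIcbrt (n : Int) : Int :=
  let hi := pvCbrtHi n (n.natAbs + 2) 1
  pvCbrtBis n (hi - 0).toNat 0 hi

-- math.isqrt(E) → Int.sqrt (exact for E ≥ 0).
def generate_edge_and_special_cases_alt (interval_end : Int) (curr_special_case_n : Int) (special_case_n : Int) (interval_sign : Int) : Int × (List (Int × Int × Int)) :=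
  let square_root := Int.sqrt interval_end
  let r := pvIcbrt interval_end
  let k : Int := if curr_special_case_n ≤ r
    then PySem.Int.floordiv (r - curr_special_case_n) special_case_n + 1 else 0
  let counter := curr_special_case_n + k * special_case_n
  let items := [(1, interval_end, interval_sign), (square_root, square_root, interval_sign)]
      ++ (PySem.List.pyRange 0 k 1).map
          (fun i => (curr_special_case_n + i * special_case_n,
                     (curr_special_case_n + i * special_case_n) ^ 2, interval_sign))
  (counter, PySem.Set.ofList items)

-- ===== PRECONDITION & SPEC =====
-- Pre_ excludes exactly where Python A does not return: interval_end < 0 (math.sqrt raises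
-- ValueError) and special_case_n ≤ 0 with the loop condition initially true (infinite loop).
def Pre_generate_edge_and_special_cases (interval_end : Int) (curr_special_case_n : Int) (special_case_n : Int) (interval_sign : Int) : Prop :=
  0 ≤ interval_end ∧
    (0 < special_case_n ∨ interval_end < curr_special_case_n * curr_special_case_n ^ 2)
instance (interval_end : Int) (curr_special_case_n : Int) (special_case_n : Int) (interval_sign : Int) : Decidable (Pre_generate_edge_and_special_cases interval_end curr_special_case_n special_case_n interval_sign) := by unfold Pre_generate_edge_and_special_cases; infer_instance

def pvWitness_generate_edge_and_special_cases : Int × Int × Int × Int := (10, 1, 1, 1)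

def Spec_generate_edge_and_special_cases (interval_end : Int) (curr_special_case_n : Int) (special_case_n : Int) (interval_sign : Int) (out : Int × (List (Int × Int × Int))) : Prop := out = generate_edge_and_special_cases_alt interval_end curr_special_case_n special_case_n interval_sign
instance (interval_end : Int) (curr_special_case_n : Int) (special_case_n : Int) (interval_sign : Int) (out : Int × (List (Int × Int × Int))) : Decidable (Spec_generate_edge_and_special_cases interval_end curr_special_case_n special_case_n interval_sign out) := by unfold Spec_generate_edge_and_special_cases; infer_instance

-- ===== CLAIM (what is proved, stated in full; the proofs are below) =====
def Claim_equal_generate_edge_and_special_cases : Prop := ∀ (interval_end : Int) (curr_special_case_n : Int) (special_case_n : Int) (interval_sign : Int), Dom_generate_edge_and_special_cases interval_end curr_special_case_n special_case_n interval_sign → Pre_generate_edge_and_special_cases interval_end curr_special_case_n special_case_n interval_sign → Spec_generate_edge_and_special_cases interval_end curr_special_case_n special_case_n interval_sign (generate_edge_and_special_cases interval_end curr_special_case_n special_case_n interval_sign)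

-- ===== LEMMAS AND PROOFS =====

lemma cube_le_cube {a b : Int} (h : a ≤ b) : a * a * a ≤ b * b * b := by
  nlinarith [sq_nonneg (a + b), sq_nonneg (a - b), sq_nonneg a, sq_nonneg b]

lemma pvCbrtHi_spec (n : Int) : ∀ (fuel : Nat) (hi : Int), 1 ≤ hi → (n + 1 - hi).toNat ≤ fuel →
    1 ≤ pvCbrtHi n fuel hi ∧
      n < pvCbrtHi n fuel hi * pvCbrtHi n fuel hi * pvCbrtHi n fuel hi := by
  intro fuel
  induction fuel with
  | zero =>
    intro hi h1 hf
    have hn : n < hi := by omega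
    have hcube : hi ≤ hi * hi * hi := by nlinarith
    exact ⟨h1, by simp only [pvCbrtHi]; omega⟩
  | succ m ih =>
    intro hi h1 hf
    rw [pvCbrtHi]
    by_cases h : hi * hi * hi ≤ n
    · simp only [h, if_true]
      have hhi : hi ≤ hi * hi * hi := by nlinarith
      exact ih (hi * 2) (by omega) (by omega)
    · simp only [h, if_false]
      have hcube : hi ≤ hi * hi * hi := by nlinarith
      exact ⟨h1, by omega⟩

lemma pvCbrtBis_spec (n : Int) : ∀ (fuel : Nat) (lo hi : Int), (hi - lo).toNat ≤ fuel →
    lo * lo * lo ≤ n → n < hi * hi * hi → lo < hi →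
    lo ≤ pvCbrtBis n fuel lo hi ∧
      pvCbrtBis n fuel lo hi * pvCbrtBis n fuel lo hi * pvCbrtBis n fuel lo hi ≤ n ∧
      n < (pvCbrtBis n fuel lo hi + 1) * (pvCbrtBis n fuel lo hi + 1) * (pvCbrtBis n fuel lo hi + 1) := by
  intro fuel
  induction fuel with
  | zero => intro lo hi hf _ _ hlt; omega
  | succ m ih =>
    intro lo hi hf hlo hhi hlt
    rw [pvCbrtBis]
    by_cases h : 1 < hi - lo
    · simp only [h, if_true]
      have hmid : PySem.Int.floordiv (lo + hi) 2 = (lo + hi) / 2 :=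
        PySem.Int.floordiv_eq_ediv_of_pos (by norm_num)
      set mid := PySem.Int.floordiv (lo + hi) 2 with hm
      have hb1 : lo < mid := by omega
      have hb2 : mid < hi := by omega
      by_cases hc : mid * mid * mid ≤ n
      · simp only [hc, if_true]
        have := ih mid hi (by omega) hc hhi (by omega)
        exact ⟨by omega, this.2⟩
      · simp only [hc, if_false]
        exact ih lo mid (by omega) hlo (by omega) (by omega)
    · simp only [h, if_false]
      have : hi = lo + 1 := by omega
      subst this
      exact ⟨le_refl _, hlo, hhi⟩

lemma pvIcbrt_char (n : Int) (hn : 0 ≤ n) :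
    ∀ m : Int, m * m ^ 2 ≤ n ↔ m ≤ pvIcbrt n := by
  have hhi := pvCbrtHi_spec n (n.natAbs + 2) 1 le_rfl (by omega)
  have hbis := pvCbrtBis_spec n (pvCbrtHi n (n.natAbs + 2) 1 - 0).toNat 0
      (pvCbrtHi n (n.natAbs + 2) 1) le_rfl (by omega) hhi.2 (by omega)
  set r := pvCbrtBis n (pvCbrtHi n (n.natAbs + 2) 1 - 0).toNat 0 (pvCbrtHi n (n.natAbs + 2) 1) with hr
  have hr1 : r * r * r ≤ n := hbis.2.1
  have hr2 : n < (r + 1) * (r + 1) * (r + 1) := hbis.2.2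
  intro m
  have hcube : m * m ^ 2 = m * m * m := by ring
  unfold pvIcbrt
  rw [← hr, hcube]
  constructor
  · intro h
    by_contra hgt
    have h1 : r + 1 ≤ m := by omega
    have := cube_le_cube h1
    omega
  · intro h
    have := cube_le_cube h
    omega

-- the exact iteration count of A's loop, as an Int
lemma cnt_step (r curr s : Int) (hs : 0 < s) (h : curr ≤ r) :
    (r - curr) / s + 1 = (if curr + s ≤ r then (r - (curr + s)) / s + 1 else 0) + 1 := by
  by_cases h2 : curr + s ≤ r
  · simp only [h2, if_true]
    have he : r - (curr + s) = (r - curr) + (-1) * s := by ring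
    rw [he, Int.add_mul_ediv_right _ _ (by omega : s ≠ 0)]
    ring
  · simp only [h2, if_false]
    have h0 : (r - curr) / s = 0 := Int.ediv_eq_zero_of_lt (by omega) (by omega)
    omega

lemma cnt_nonneg (r curr s : Int) (hs : 0 < s) :
    0 ≤ (if curr ≤ r then (r - curr) / s + 1 else 0) := by
  by_cases h : curr ≤ r
  · simp only [h, if_true]
    have := Int.ediv_nonneg (by omega : (0:Int) ≤ r - curr) (by omega : (0:Int) ≤ s)
    omega
  · simp [h]

lemma loopA_closed (E s sign r : Int) (hs : 0 < s)
    (hchar : ∀ m : Int, m * m ^ 2 ≤ E ↔ m ≤ r) :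
    ∀ (fuel : Nat) (curr : Int) (st : PySem.Set (Int × Int × Int)),
      (r + 1 - curr).toNat ≤ fuel →
      pvLoopA E s sign fuel curr st =
        (curr + (if curr ≤ r then (r - curr) / s + 1 else 0) * s,
         (List.range (if curr ≤ r then (r - curr) / s + 1 else 0).toNat).foldl
           (fun (acc : PySem.Set (Int × Int × Int)) (i : Nat) => PySem.Set.add acc
             (curr + (i : Int) * s, (curr + (i : Int) * s) ^ 2, sign)) st) := by
  intro fuel
  induction fuel with
  | zero =>
    intro curr st hf
    have hgt : ¬ curr ≤ r := by omega
    simp only [pvLoopA, hgt, if_false]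
    simp
  | succ m ih =>
    intro curr st hf
    by_cases hc : curr ≤ r
    · have hcond : curr * curr ^ 2 ≤ E := (hchar curr).2 hc
      rw [pvLoopA]
      simp only [hcond, if_true]
      rw [ih (curr + s) _ (by omega)]
      have hk := cnt_step r curr s hs hc
      set c' : Int := if curr + s ≤ r then (r - (curr + s)) / s + 1 else 0 with hc'
      have hc'0 : 0 ≤ c' := cnt_nonneg r (curr + s) s hs
      refine Prod.ext ?_ ?_
      · simp only [hc, if_true]
        rw [hk]; ring
    -- sets: peel the first iteration off the range fold
      · simp only [hc, if_true]
        rw [hk]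
        have htn : (c' + 1).toNat = c'.toNat + 1 := by omega
        rw [htn, List.range_succ_eq_map, List.foldl_cons, List.foldl_map]
        congr 1
        · funext acc i
          push_cast
          ring_nf
        · push_cast
          ring_nf
    · have hcond : ¬ curr * curr ^ 2 ≤ E := by rw [hchar]; omega
      rw [pvLoopA]
      simp [hcond, hc]

-- ===== VERDICT (by name: the statement is the Claim_ definition above) =====
theorem generate_edge_and_special_cases_spec :
    Claim_equal_generate_edge_and_special_cases := by
  unfold Claim_equal_generate_edge_and_special_cases
  intro E c0 s sign _ hPre
  unfold Spec_generate_edge_and_special_cases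
  obtain ⟨hE, hPre2⟩ := hPre
  have hchar := pvIcbrt_char E hE
  set r := pvIcbrt E with hr
  unfold generate_edge_and_special_cases generate_edge_and_special_cases_alt
  simp only [← hr]
  set sq := Int.sqrt E with hsq
  set t1 : Int × Int × Int := (1, E, sign) with ht1
  set t2 : Int × Int × Int := (sq, sq, sign) with ht2
  set st0 := PySem.Set.add (PySem.Set.add PySem.Set.empty t1) t2 with hst0
  by_cases hs : 0 < s
  · -- positive step: A's loop equals the closed form
    have hrE : r ≤ (E.natAbs : Int) := by
      have h1 := (hchar r).2 le_rfl
      by_cases h0 : r ≤ 0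
      · omega
      · have : r ≤ r * r ^ 2 := by nlinarith
        omega
    rw [loopA_closed E s sign r hs hchar (E.natAbs + 1 + c0.natAbs) c0 st0 (by omega)]
    have hfd : PySem.Int.floordiv (r - c0) s = (r - c0) / s :=
      PySem.Int.floordiv_eq_ediv_of_pos hs
    set k : Int := if c0 ≤ r then (r - c0) / s + 1 else 0 with hkdef
    have hkeq : (if c0 ≤ r then PySem.Int.floordiv (r - c0) s + 1 else 0) = k := by
      rw [hfd]
    rw [hkeq]
    refine Prod.ext rfl ?_
    rw [PySem.Set.ofList_eq_foldl, List.foldl_append]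
    have hinit : List.foldl PySem.Set.add ([] : PySem.Set (Int × Int × Int)) [t1, t2] = st0 := rfl
    rw [hinit, PySem.List.pyRange_one, List.foldl_map, List.foldl_map]
    have hk0 : 0 ≤ k := cnt_nonneg r c0 s hs
    have hkn : (k - 0).toNat = k.toNat := by omega
    rw [hkn]
    simp
  · -- non-positive step: Pre_ forces the loop condition to be false at entry
    have hlt : E < c0 * c0 ^ 2 := by omega
    have hc0 : ¬ c0 ≤ r := by rw [← hchar]; omega
    have hF : E.natAbs + 1 + c0.natAbs = (E.natAbs + c0.natAbs) + 1 := by omega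
    rw [hF, pvLoopA]
    simp only [show ¬ c0 * c0 ^ 2 ≤ E by omega, if_false]
    simp only [hc0, if_false]
    refine Prod.ext (by simp) ?_
    rw [PySem.List.pyRange_one]
    simp [PySem.Set.ofList_eq_foldl, hst0]
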